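-- pv_equiv track=rewrite | github.com/egil10/kunstquiz | remove_small_images.py | check_duplicates
-- ===== SOURCE A (Python) =====
-- def check_duplicates(paintings):
--     """Check for duplicate URLs"""
--     seen_urls = set()
--     duplicates = []
--
--     for i, painting in enumerate(paintings):
--         url = painting.get('url', '')
--         if url in seen_urls:
--             duplicates.append(i)
--         else:
--             seen_urls.add(url)
--
--     return duplicates
-- ===== SOURCE B (Python) =====
-- def check_duplicates(paintings):
--     """Check for duplicate URLs"""
--     groups = {}
--     for i, painting in enumerate(paintings):
--         groups.setdefault(painting.get('url', ''), []).append(i)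
--     result = []
--     for indices in groups.values():
--         result.extend(indices[1:])
--     return sorted(result)
-- ===== Notes on version B (the rewrite author's own statement) =====
-- stated objective: alternative
-- what changed: Replaces the one-pass seen-set-with-branch by a group-by pass (dict url -> list of indices) followed by a collect pass taking every occurrence after the first of each group, sorted back to index order.
import Mathlib
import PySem

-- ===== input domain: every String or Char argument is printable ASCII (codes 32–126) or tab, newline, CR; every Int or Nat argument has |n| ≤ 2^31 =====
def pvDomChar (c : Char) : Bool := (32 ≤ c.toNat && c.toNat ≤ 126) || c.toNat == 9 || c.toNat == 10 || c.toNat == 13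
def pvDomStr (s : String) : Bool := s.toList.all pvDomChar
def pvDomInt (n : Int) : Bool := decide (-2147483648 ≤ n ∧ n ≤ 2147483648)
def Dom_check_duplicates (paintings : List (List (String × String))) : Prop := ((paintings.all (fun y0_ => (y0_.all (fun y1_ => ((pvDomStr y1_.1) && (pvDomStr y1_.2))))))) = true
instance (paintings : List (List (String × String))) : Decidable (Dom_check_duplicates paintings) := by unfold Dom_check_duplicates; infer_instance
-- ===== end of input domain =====

-- B groups indices by URL in one dict pass, then collects indices[1:] of each group and sorts
-- back to index order — a different two-pass decomposition of A's one-pass seen-set scan (objective: alternative).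

-- ===== PORT A =====
-- painting.get('url', ''): first-match lookup in the association list (Python dicts have unique keys)
def pvGetUrl (painting : List (String × String)) : String :=
  (painting.lookup "url").getD ""

def check_duplicates (paintings : List (List (String × String))) : List Int :=
  ((PySem.List.enumerate paintings).foldl
    (fun (st : PySem.Set String × List Int) pr =>
      let url := pvGetUrl pr.2
      if PySem.Set.contains st.1 url then (st.1, st.2 ++ [pr.1])
      else (PySem.Set.add st.1 url, st.2))
    (PySem.Set.empty, [])).2

-- ===== PORT B =====
def check_duplicates_alt (paintings : List (List (String × String))) : List Int :=
  let groups : PySem.Dict String (List Int) :=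
    (PySem.List.enumerate paintings).foldl
      (fun d pr => d.modify (pvGetUrl pr.2) [] (fun l => l ++ [pr.1])) PySem.Dict.empty
  -- indices[1:] is List.drop 1 (exact: a list slice from 1)
  let result := groups.values.foldl (fun acc indices => acc ++ indices.drop 1) ([] : List Int)
  PySem.List.sorted result (fun x => x) false

-- ===== PRECONDITION & SPEC =====
def Spec_check_duplicates (paintings : List (List (String × String))) (out : List Int) : Prop := out = check_duplicates_alt paintings
instance (paintings : List (List (String × String))) (out : List Int) : Decidable (Spec_check_duplicates paintings out) := by unfold Spec_check_duplicates; infer_instance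

-- ===== CLAIM (what is proved, stated in full; the proofs are below) =====
def Claim_equal_check_duplicates : Prop := ∀ (paintings : List (List (String × String))), Dom_check_duplicates paintings → Spec_check_duplicates paintings (check_duplicates paintings)

-- ===== LEMMAS AND PROOFS =====

-- urls of an (index, painting) list
def pvUrls (es : List (Int × List (String × String))) : List String :=
  es.map (fun pr => pvGetUrl pr.2)

-- A's duplicate list, computed structurally from a starting seen-set
def dupsFrom (s : PySem.Set String) : List (Int × List (String × String)) → List Int
  | [] => []
  | p :: t =>
      (if pvGetUrl p.2 ∈ s then [p.1] else []) ++
        dupsFrom (PySem.Set.add s (pvGetUrl p.2)) t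

-- the indices of the occurrences of url c, in order
def pvOcc (es : List (Int × List (String × String))) (c : String) : List Int :=
  (es.filter (fun pr => pvGetUrl pr.2 == c)).map (fun pr => pr.1)

-- B's result before sorting
def pvFM (es : List (Int × List (String × String))) : List Int :=
  (PySem.Set.ofList (pvUrls es)).flatMap (fun c => (pvOcc es c).drop 1)

lemma foldA_eq (es : List (Int × List (String × String))) :
    ∀ (s : PySem.Set String) (acc : List Int),
      es.foldl
        (fun (st : PySem.Set String × List Int) pr =>
          let url := pvGetUrl pr.2
          if PySem.Set.contains st.1 url then (st.1, st.2 ++ [pr.1])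
          else (PySem.Set.add st.1 url, st.2)) (s, acc)
        = (PySem.Set.update s (pvUrls es), acc ++ dupsFrom s es) := by
  induction es with
  | nil => intro s acc; simp [pvUrls, dupsFrom, PySem.Set.update]
  | cons p t ih =>
      intro s acc
      by_cases h : pvGetUrl p.2 ∈ s
      · have hc : PySem.Set.contains s (pvGetUrl p.2) = true := by
          simpa [PySem.Set.contains] using h
        have hadd : PySem.Set.add s (pvGetUrl p.2) = s := by
          simp [PySem.Set.add, PySem.Set.contains, h]
        simp only [List.foldl_cons, hc, if_pos, dupsFrom, pvUrls, List.map_cons]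
        rw [ih]
        simp [PySem.Set.update, pvUrls, h]
      · have hc : PySem.Set.contains s (pvGetUrl p.2) = false := by
          simpa [PySem.Set.contains] using h
        simp only [List.foldl_cons, hc, Bool.false_eq_true, if_false, dupsFrom, pvUrls,
          List.map_cons]
        rw [ih]
        simp [PySem.Set.update, pvUrls, h]

lemma dupsFrom_append (es es' : List (Int × List (String × String))) :
    ∀ s, dupsFrom s (es ++ es') =
      dupsFrom s es ++ dupsFrom (PySem.Set.update s (pvUrls es)) es' := by
  induction es with
  | nil => intro s; simp [dupsFrom, pvUrls, PySem.Set.update]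
  | cons p t ih =>
      intro s
      simp only [List.cons_append, dupsFrom, ih, PySem.Set.update, pvUrls, List.map_cons,
        List.foldl_cons, List.append_assoc]

lemma dupsFrom_sublist (es : List (Int × List (String × String))) :
    ∀ s, (dupsFrom s es).Sublist (es.map (fun pr => pr.1)) := by
  induction es with
  | nil => intro s; simp [dupsFrom]
  | cons p t ih =>
      intro s
      by_cases h : pvGetUrl p.2 ∈ s
      · simpa [dupsFrom, h] using (ih (PySem.Set.add s (pvGetUrl p.2))).cons₂ p.1
      · simpa [dupsFrom, h] using (ih (PySem.Set.add s (pvGetUrl p.2))).cons p.1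

lemma update_empty (xs : List String) :
    PySem.Set.update (PySem.Set.empty) xs = PySem.Set.ofList xs := by
  rw [PySem.Set.ofList_eq_foldl]; rfl

lemma ofList_append_singleton (xs : List String) (y : String) :
    PySem.Set.ofList (xs ++ [y]) = PySem.Set.add (PySem.Set.ofList xs) y := by
  simp [PySem.Set.ofList_eq_foldl, List.foldl_append]

lemma ofList_append_singleton_mem (xs : List String) (y : String) (h : y ∈ xs) :
    PySem.Set.ofList (xs ++ [y]) = PySem.Set.ofList xs := by
  rw [ofList_append_singleton]
  have : y ∈ PySem.Set.ofList xs := (PySem.Set.mem_ofList _ _).mpr h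
  simp [PySem.Set.add, PySem.Set.contains, this]

lemma ofList_append_singleton_not_mem (xs : List String) (y : String) (h : y ∉ xs) :
    PySem.Set.ofList (xs ++ [y]) = PySem.Set.ofList xs ++ [y] := by
  rw [ofList_append_singleton]
  have : y ∉ PySem.Set.ofList xs := fun hy => h ((PySem.Set.mem_ofList _ _).mp hy)
  simp [PySem.Set.add, PySem.Set.contains, this]

-- extending one group of a flatMap by [x] at its end is, up to permutation, appending [x]
lemma flatMap_extend_perm (g : String → List Int) (v : String) (x : Int) :
    ∀ (ks : List String), ks.Nodup → v ∈ ks →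
      (ks.flatMap (fun c => g c ++ if c = v then [x] else [])).Perm (ks.flatMap g ++ [x]) := by
  intro ks
  induction ks with
  | nil => intro _ h; cases h
  | cons k t ih =>
      intro hnd hv
      rcases List.mem_cons.mp hv with hk | ht
      · subst hk
        have hnv : ∀ c ∈ t, (g c ++ if c = v then [x] else []) = g c := by
          intro c hc
          have hcv : c ≠ v := fun hc' => (List.nodup_cons.mp hnd).1 (hc' ▸ hc)
          simp [hcv]
        have h1 : (v :: t).flatMap (fun c => g c ++ if c = v then [x] else [])
            = (g v ++ [x]) ++ t.flatMap g := by
          rw [List.flatMap_cons, if_pos rfl, List.flatMap, List.map_congr_left hnv]; rfl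
        rw [h1, List.flatMap_cons, List.append_assoc, List.append_assoc]
        exact List.Perm.append_left (g v) List.perm_append_comm
      · have hk : k ≠ v := fun h => (List.nodup_cons.mp hnd).1 (h ▸ ht)
        simp only [List.flatMap_cons, if_neg hk, List.append_nil, List.append_assoc]
        exact List.Perm.append_left (g k) (ih (List.nodup_cons.mp hnd).2 ht)

lemma occ_append (es : List (Int × List (String × String))) (p : Int × List (String × String)) (c : String) :
    pvOcc (es ++ [p]) c = pvOcc es c ++ (if pvGetUrl p.2 = c then [p.1] else []) := by
  by_cases h : pvGetUrl p.2 = c <;> simp [pvOcc, List.filter_append, h]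

lemma occ_ne_nil_of_mem (es : List (Int × List (String × String))) (c : String) (h : c ∈ pvUrls es) :
    pvOcc es c ≠ [] := by
  simp only [pvUrls, List.mem_map] at h
  obtain ⟨pr, hpr, hc⟩ := h
  simp only [pvOcc, ne_eq, List.map_eq_nil_iff, List.filter_eq_nil_iff]
  intro hall
  exact (hall pr hpr) (by simp [hc])

lemma occ_eq_nil_of_not_mem (es : List (Int × List (String × String))) (c : String) (h : c ∉ pvUrls es) :
    pvOcc es c = [] := by
  simp only [pvOcc, List.map_eq_nil_iff, List.filter_eq_nil_iff]
  intro pr hpr hb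
  exact h (by simp only [pvUrls, List.mem_map]; exact ⟨pr, hpr, by simpa using hb⟩)

lemma perm_FM_dups (es : List (Int × List (String × String))) :
    (pvFM es).Perm (dupsFrom PySem.Set.empty es) := by
  induction es using List.reverseRecOn with
  | nil => simp [pvFM, pvUrls, dupsFrom, PySem.Set.ofList, pvOcc]
  | append_singleton es p ih =>
      have hurls : pvUrls (es ++ [p]) = pvUrls es ++ [pvGetUrl p.2] := by
        simp [pvUrls]
      have hdups : dupsFrom PySem.Set.empty (es ++ [p]) =
          dupsFrom PySem.Set.empty es ++
            (if pvGetUrl p.2 ∈ PySem.Set.ofList (pvUrls es) then [p.1] else []) := by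
        rw [dupsFrom_append, update_empty]
        simp [dupsFrom]
      by_cases hmem : pvGetUrl p.2 ∈ pvUrls es
      · -- seen before: the group of this url gains p.1 at its end
        have hmemS : pvGetUrl p.2 ∈ PySem.Set.ofList (pvUrls es) :=
          (PySem.Set.mem_ofList _ _).mpr hmem
        have hkeys : PySem.Set.ofList (pvUrls (es ++ [p])) = PySem.Set.ofList (pvUrls es) := by
          rw [hurls]; exact ofList_append_singleton_mem _ _ hmem
        have hfun : ∀ c ∈ PySem.Set.ofList (pvUrls es),
            (pvOcc (es ++ [p]) c).drop 1 =
              (pvOcc es c).drop 1 ++ (if c = pvGetUrl p.2 then [p.1] else []) := by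
          intro c hc
          rw [occ_append]
          by_cases hcv : c = pvGetUrl p.2
          · have hne : pvOcc es c ≠ [] := occ_ne_nil_of_mem _ _ ((PySem.Set.mem_ofList _ _).mp hc)
            have hlen : 1 ≤ (pvOcc es c).length :=
              List.length_pos_of_ne_nil hne
            rw [if_pos hcv.symm, if_pos hcv, List.drop_append_of_le_length hlen]
          · rw [if_neg (fun h => hcv h.symm), if_neg hcv]; simp
        have hFM : pvFM (es ++ [p]) =
            (PySem.Set.ofList (pvUrls es)).flatMap
              (fun c => (pvOcc es c).drop 1 ++ (if c = pvGetUrl p.2 then [p.1] else [])) := by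
          rw [pvFM, hkeys, List.flatMap, List.flatMap, List.map_congr_left hfun]
        rw [hFM, hdups, if_pos hmemS]
        exact (flatMap_extend_perm _ _ _ _ (PySem.Set.nodup_ofList _) hmemS).trans
          (List.Perm.append_right _ ih)
      · -- new url: a fresh singleton group contributes nothing after drop 1
        have hmemS : pvGetUrl p.2 ∉ PySem.Set.ofList (pvUrls es) :=
          fun hy => hmem ((PySem.Set.mem_ofList _ _).mp hy)
        have hkeys : PySem.Set.ofList (pvUrls (es ++ [p])) =
            PySem.Set.ofList (pvUrls es) ++ [pvGetUrl p.2] := by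
          rw [hurls]; exact ofList_append_singleton_not_mem _ _ hmem
        have hfun : ∀ c ∈ PySem.Set.ofList (pvUrls es),
            (pvOcc (es ++ [p]) c).drop 1 = (pvOcc es c).drop 1 := by
          intro c hc
          have hcv : ¬ pvGetUrl p.2 = c := by
            intro h; exact hmem (h ▸ (PySem.Set.mem_ofList _ _).mp hc)
          rw [occ_append, if_neg hcv]; simp
        have hnewgroup : (pvOcc (es ++ [p]) (pvGetUrl p.2)).drop 1 = [] := by
          rw [occ_append, occ_eq_nil_of_not_mem _ _ hmem, if_pos rfl]; simp
        have hFM : pvFM (es ++ [p]) = pvFM es := by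
          rw [pvFM, hkeys, List.flatMap_append, List.flatMap, List.map_congr_left hfun,
            List.flatMap_cons, hnewgroup]
          simp [pvFM, List.flatMap]
        rw [hFM, hdups, if_neg hmemS, List.append_nil]
        exact ih

lemma pairwise_dups (paintings : List (List (String × String))) :
    (dupsFrom PySem.Set.empty (PySem.List.enumerate paintings)).Pairwise (fun a b => a < b) := by
  have h1 : ((PySem.List.enumerate paintings).map (fun pr => pr.1)).Pairwise
      (fun (a b : Int) => a < b) := by
    rw [List.pairwise_map]
    exact PySem.List.pairwise_lt_enumerate paintings 0
  exact List.Pairwise.sublist (dupsFrom_sublist _ _) h1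

lemma alt_eq_sorted_FM (paintings : List (List (String × String))) :
    check_duplicates_alt paintings =
      PySem.List.sorted (pvFM (PySem.List.enumerate paintings)) (fun x => x) false := by
  simp only [check_duplicates_alt]
  have hfold : (PySem.List.enumerate paintings).foldl
        (fun d pr => d.modify (pvGetUrl pr.2) [] (fun l => l ++ [pr.1])) PySem.Dict.empty
      = ((PySem.List.enumerate paintings).map (fun pr => (pvGetUrl pr.2, pr.1))).foldl
          (fun d p => d.modify p.1 [] (fun l => l ++ [p.2])) PySem.Dict.empty := by
    rw [List.foldl_map]
  have hgetD : ∀ c, ((PySem.List.enumerate paintings).foldl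
        (fun d pr => d.modify (pvGetUrl pr.2) [] (fun l => l ++ [pr.1]))
        PySem.Dict.empty).getD c [] = pvOcc (PySem.List.enumerate paintings) c := by
    intro c
    rw [hfold, PySem.Dict.getD_foldl_modify_append]
    simp only [List.filter_map, List.map_map, PySem.Dict.getD_empty, List.nil_append]
    rfl
  have hkeys : ((PySem.List.enumerate paintings).foldl
        (fun d pr => d.modify (pvGetUrl pr.2) [] (fun l => l ++ [pr.1]))
        PySem.Dict.empty).keys = PySem.Set.ofList (pvUrls (PySem.List.enumerate paintings)) := by
    rw [PySem.Dict.keys_foldl_modify_key (PySem.List.enumerate paintings)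
      (fun pr => pvGetUrl pr.2) [] (fun _ pr => (fun l => l ++ [pr.1])) PySem.Dict.empty]
    simp [PySem.Dict.keys_empty, PySem.Set.update, PySem.Set.ofList_eq_foldl, pvUrls]
  have hnodup : ((PySem.List.enumerate paintings).foldl
        (fun d pr => d.modify (pvGetUrl pr.2) [] (fun l => l ++ [pr.1]))
        PySem.Dict.empty).keys.Nodup :=
    PySem.Dict.nodup_keys_foldl_modify_key (PySem.List.enumerate paintings)
      (fun pr => pvGetUrl pr.2) [] (fun _ pr => (fun l => l ++ [pr.1])) PySem.Dict.empty
      (by simp [PySem.Dict.keys_empty])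
  have hvalues : ((PySem.List.enumerate paintings).foldl
        (fun d pr => d.modify (pvGetUrl pr.2) [] (fun l => l ++ [pr.1]))
        PySem.Dict.empty).values
      = (PySem.Set.ofList (pvUrls (PySem.List.enumerate paintings))).map
          (fun c => pvOcc (PySem.List.enumerate paintings) c) := by
    rw [PySem.Dict.values_eq_map_keys _ hnodup [], hkeys]
    exact List.map_congr_left (fun c _ => hgetD c)
  rw [hvalues, PySem.List.foldl_append_eq_flatMap, List.nil_append]
  congr 1
  rw [pvFM, List.flatMap_map]

-- ===== VERDICT (by name: the statement is the Claim_ definition above) =====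
theorem check_duplicates_spec : Claim_equal_check_duplicates := by
  intro paintings _
  unfold Spec_check_duplicates
  have hA : check_duplicates paintings
      = dupsFrom PySem.Set.empty (PySem.List.enumerate paintings) := by
    unfold check_duplicates
    rw [foldA_eq]
    rfl
  rw [hA, alt_eq_sorted_FM]
  exact (PySem.List.sorted_eq_of_perm_of_pairwise_lt _ _ _
    (perm_FM_dups _).symm (pairwise_dups _)).symm
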